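-- pv_equiv track=rewrite | github.com/shoyip/SectorBootstrap | 06_grid_evaluation.py | compute_top1_agreement
-- ===== SOURCE A (Python) =====
-- def compute_top1_agreement(rankings_list):
--     """
--     Count how many sub-alignments agree on the top-1 mutation.
--
--     Args:
--         rankings_list: List of rankings
--
--     Returns:
--         Maximum agreement count (how many rankings share the same top-1)
--     """
--     valid_rankings = [r for r in rankings_list if r is not None and len(r) > 0]
--     if len(valid_rankings) == 0:
--         return 0
--
--     # Get top-1 from each ranking (skip the initial D189S mutation at index 0)
--     top1_mutations = []
--     for ranking in valid_rankings:
--         # Index 0 is the initial mutation (D189S), so index 1 is the first predicted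
--         if len(ranking) > 1:
--             top1_mutations.append(ranking[1])
--
--     if not top1_mutations:
--         return 0
--
--     # Count occurrences
--     from collections import Counter
--     counts = Counter(top1_mutations)
--
--     return max(counts.values())
-- ===== SOURCE B (Python) =====
-- def compute_top1_agreement(rankings_list):
--     # Collect the top-1 (index 1) of every usable ranking in one pass.
--     tops = [r[1] for r in rankings_list if r is not None and len(r) > 1]
--     if not tops:
--         return 0
--     # Sort, then find the longest run of equal adjacent elements.
--     tops.sort()
--     best = 1
--     run = 1
--     for prev, cur in zip(tops, tops[1:]):
--         if cur == prev:
--             run += 1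
--             if run > best:
--                 best = run
--         else:
--             run = 1
--     return best
-- ===== Notes on version B (the rewrite author's own statement) =====
-- stated objective: alternative
-- what changed: Replaces the two-stage filter + Counter + max-of-values with a single filtering pass collecting top-1 elements, then sort and one linear scan for the longest run of equal adjacent elements.
import Mathlib
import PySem

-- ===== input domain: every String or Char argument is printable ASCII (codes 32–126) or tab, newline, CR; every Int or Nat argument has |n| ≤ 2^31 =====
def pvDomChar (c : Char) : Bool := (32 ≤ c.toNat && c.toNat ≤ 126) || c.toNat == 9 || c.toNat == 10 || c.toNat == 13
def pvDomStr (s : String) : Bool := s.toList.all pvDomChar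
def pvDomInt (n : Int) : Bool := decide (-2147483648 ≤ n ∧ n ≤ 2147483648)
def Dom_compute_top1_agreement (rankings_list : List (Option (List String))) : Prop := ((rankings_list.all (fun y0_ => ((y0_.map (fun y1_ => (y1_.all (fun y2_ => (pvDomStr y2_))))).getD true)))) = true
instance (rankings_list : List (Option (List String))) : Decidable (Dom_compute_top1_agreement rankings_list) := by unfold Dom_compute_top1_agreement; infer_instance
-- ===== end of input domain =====

-- B replaces Counter + max-of-values with sort + longest-equal-run scan (alternative algorithm, similar cost).

-- ===== PORT A =====
-- A-side helper: the `valid_rankings` list comprehension (filter: not None and non-empty)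
def pvValid (rankings_list : List (Option (List String))) : List (List String) :=
  rankings_list.filterMap (fun r => match r with
    | none => none
    | some l => if 0 < l.length then some l else none)

def compute_top1_agreement (rankings_list : List (Option (List String))) : Int :=
  let valid_rankings : List (List String) := pvValid rankings_list
  if valid_rankings.length = 0 then 0
  else
    let top1_mutations : List String :=
      valid_rankings.foldl (fun acc ranking =>
        if 1 < ranking.length then acc ++ [(PySem.List.pyGet? ranking 1).getD ""] else acc) []
    if top1_mutations = [] then 0
    else
      (PySem.List.max? (PySem.Dict.counter top1_mutations).values (fun v => v)).getD 0

-- ===== PORT B =====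
-- B-side helper: the single list comprehension collecting the top-1 elements
def pvTops (rankings_list : List (Option (List String))) : List String :=
  rankings_list.filterMap (fun r => match r with
    | none => none
    | some l => if 1 < l.length then PySem.List.pyGet? l 1 else none)

def compute_top1_agreement_alt (rankings_list : List (Option (List String))) : Int :=
  let tops : List String := pvTops rankings_list
  if tops = [] then 0
  else
    let s := PySem.List.sorted tops (fun x => x) false
    ((s.zip s.tail).foldl
      (fun rb pc =>
        if pc.2 = pc.1 then
          (rb.1 + 1, if rb.1 + 1 > rb.2 then rb.1 + 1 else rb.2)
        else (1, rb.2)) ((1 : Int), (1 : Int))).2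

-- ===== PRECONDITION & SPEC =====
def Spec_compute_top1_agreement (rankings_list : List (Option (List String))) (out : Int) : Prop := out = compute_top1_agreement_alt rankings_list
instance (rankings_list : List (Option (List String))) (out : Int) : Decidable (Spec_compute_top1_agreement rankings_list out) := by unfold Spec_compute_top1_agreement; infer_instance

-- ===== CLAIM (what is proved, stated in full; the proofs are below) =====
def Claim_equal_compute_top1_agreement : Prop := ∀ (rankings_list : List (Option (List String))), Dom_compute_top1_agreement rankings_list → Spec_compute_top1_agreement rankings_list (compute_top1_agreement rankings_list)

-- ===== LEMMAS AND PROOFS =====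

-- recursion used to reason about B's zip-fold
def pvAux (prev : String) (run best : Int) : List String → Int
  | [] => best
  | c :: t => if c = prev then pvAux c (run + 1) (if run + 1 > best then run + 1 else best) t
              else pvAux c 1 best t

-- the maximum run length in prev :: t, given a current run of `run` copies of prev
def pvMaxRun (prev : String) (run : Int) : List String → Int
  | [] => run
  | c :: t => if c = prev then pvMaxRun c (run + 1) t else max run (pvMaxRun c 1 t)

theorem pvTopsA_eq (rl : List (Option (List String))) (acc : List String) :
    (pvValid rl).foldl
      (fun acc ranking => if 1 < ranking.length then acc ++ [(PySem.List.pyGet? ranking 1).getD ""] else acc) acc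
    = acc ++ pvTops rl := by
  induction rl generalizing acc with
  | nil => simp [pvValid, pvTops]
  | cons r rl ih =>
    cases r with
    | none => simpa [pvValid, pvTops, List.filterMap_cons] using ih acc
    | some l =>
      by_cases h1 : 1 < l.length
      · have h0 : 0 < l.length := by omega
        have hg : PySem.List.pyGet? l 1 = some l[1] := by
          have : ((1 : Nat) : Int) = (1 : Int) := by norm_num
          rw [← this, PySem.List.pyGet?_natCast]
          exact List.getElem?_eq_getElem h1
        simp only [pvValid, pvTops, List.filterMap_cons, if_pos h0, if_pos h1, hg,
          List.foldl_cons, Option.getD_some]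
        change List.foldl _ (acc ++ [l[1]]) (pvValid rl) = acc ++ l[1] :: pvTops rl
        rw [ih]
        simp
      · by_cases h0 : 0 < l.length
        · simpa [pvValid, pvTops, List.filterMap_cons, if_pos h0, if_neg h1] using ih acc
        · simpa [pvValid, pvTops, List.filterMap_cons, if_neg h0, if_neg h1] using ih acc

theorem pvZipfold_eq (t : List String) (x : String) (run best : Int) :
    (((x :: t).zip t).foldl
      (fun rb pc =>
        if pc.2 = pc.1 then
          (rb.1 + 1, if rb.1 + 1 > rb.2 then rb.1 + 1 else rb.2)
        else (1, rb.2)) (run, best)).2 = pvAux x run best t := by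
  induction t generalizing x run best with
  | nil => simp [pvAux]
  | cons c t ih =>
    simp only [List.zip_cons_cons, List.foldl_cons, pvAux]
    by_cases h : c = x
    · simp only [if_pos h]
      exact ih c (run + 1) _
    · simp only [if_neg h]
      exact ih c 1 best

theorem pvRun_le_maxRun (t : List String) (x : String) (run : Int) : run ≤ pvMaxRun x run t := by
  induction t generalizing x run with
  | nil => simp [pvMaxRun]
  | cons c t ih =>
    simp only [pvMaxRun]
    split
    · have := ih c (run + 1); omega
    · exact le_max_left _ _

theorem pvAux_eq (t : List String) (x : String) (run best : Int) (h1 : 1 ≤ run) (h2 : run ≤ best) :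
    pvAux x run best t = max best (pvMaxRun x run t) := by
  induction t generalizing x run best with
  | nil => simp only [pvAux, pvMaxRun]; omega
  | cons c t ih =>
    simp only [pvAux, pvMaxRun]
    by_cases h : c = x
    · simp only [if_pos h]
      have hb : (if run + 1 > best then run + 1 else best) = max best (run + 1) := by
        split <;> omega
      rw [hb, ih c (run + 1) (max best (run + 1)) (by omega) (by omega)]
      have := pvRun_le_maxRun t c (run + 1)
      omega
    · simp only [if_neg h]
      rw [ih c 1 best (le_refl 1) (by omega)]
      have := pvRun_le_maxRun t c 1
      omega

theorem pvL1 (t : List String) (x : String) (run : Int)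
    (hx : ∀ y ∈ t, x ≤ y) (hp : t.Pairwise (· ≤ ·)) :
    run + (t.count x : Int) ≤ pvMaxRun x run t := by
  induction t generalizing x run with
  | nil => simp [pvMaxRun]
  | cons c t ih =>
    obtain ⟨hc, hp2⟩ := List.pairwise_cons.mp hp
    simp only [pvMaxRun]
    by_cases h : c = x
    · subst h
      simp only [List.count_cons_self]
      have := ih c (run + 1) hc hp2
      push_cast
      omega
    · simp only [if_neg h]
      have hxc : x < c := lt_of_le_of_ne (hx c (List.mem_cons_self ..)) (fun e => h e.symm)
      have hnot : x ∉ t := fun hm => absurd (hc x hm) (not_le.mpr hxc)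
      have hcnt : (c :: t).count x = 0 := by
        rw [List.count_eq_zero]
        simp only [List.mem_cons]
        rintro (e | hm)
        · exact h e.symm
        · exact hnot hm
      rw [hcnt]
      have := le_max_left run (pvMaxRun c 1 t)
      omega

theorem pvL2 (t : List String) (x : String) (run : Int) (h1 : 1 ≤ run)
    (hx : ∀ y ∈ t, x ≤ y) (hp : t.Pairwise (· ≤ ·)) :
    ∀ y ∈ t, (t.count y : Int) ≤ pvMaxRun x run t := by
  induction t generalizing x run with
  | nil => simp
  | cons c t ih =>
    intro y hy
    obtain ⟨hc, hp2⟩ := List.pairwise_cons.mp hp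
    simp only [pvMaxRun]
    by_cases h : c = x
    · subst h
      rw [if_pos rfl]
      by_cases hyx : y = c
      · subst hyx
        have := pvL1 t y (run + 1) hc hp2
        simp only [List.count_cons_self]
        push_cast
        omega
      · have hyt : y ∈ t := by
          rcases List.mem_cons.mp hy with e | hm
          · exact absurd e hyx
          · exact hm
        have := ih c (run + 1) (by omega) hc hp2 y hyt
        have hcnt : (c :: t).count y = t.count y := by
          simp [(show ¬c = y from fun e => hyx e.symm)]
        rw [hcnt]
        exact this
    · simp only [if_neg h]
      by_cases hyx : y = c
      · subst hyx
        have := pvL1 t y 1 hc hp2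
        simp only [List.count_cons_self]
        have hle := le_max_right run (pvMaxRun y 1 t)
        push_cast
        omega
      · have hyt : y ∈ t := by
          rcases List.mem_cons.mp hy with e | hm
          · exact absurd e hyx
          · exact hm
        have := ih c 1 (le_refl 1) hc hp2 y hyt
        have hcnt : (c :: t).count y = t.count y := by
          simp [(show ¬c = y from fun e => hyx e.symm)]
        rw [hcnt]
        have hle := le_max_right run (pvMaxRun c 1 t)
        omega

theorem pvU (t : List String) (x : String) (run B : Int) (h1 : 1 ≤ run)
    (hx : ∀ y ∈ t, x ≤ y) (hp : t.Pairwise (· ≤ ·))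
    (hB1 : run + (t.count x : Int) ≤ B)
    (hB2 : ∀ y, y ≠ x → (t.count y : Int) ≤ B) :
    pvMaxRun x run t ≤ B := by
  induction t generalizing x run with
  | nil =>
    simp only [pvMaxRun]
    simp only [List.count_nil] at hB1
    omega
  | cons c t ih =>
    obtain ⟨hc, hp2⟩ := List.pairwise_cons.mp hp
    simp only [pvMaxRun]
    by_cases h : c = x
    · subst h
      rw [if_pos rfl]
      apply ih c (run + 1) (by omega) hc hp2
      · simp only [List.count_cons_self] at hB1
        push_cast at hB1 ⊢
        omega
      · intro y hyc
        have := hB2 y hyc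
        have hcnt : (c :: t).count y = t.count y := by
          simp [(show ¬c = y from fun e => hyc e.symm)]
        rw [hcnt] at this
        exact this
    · simp only [if_neg h]
      have hxc : x < c := lt_of_le_of_ne (hx c (List.mem_cons_self ..)) (fun e => h e.symm)
      have hcpos : (0 : Int) ≤ ((c :: t).count x : Int) := by positivity
      apply max_le
      · omega
      · apply ih c 1 (le_refl 1) hc hp2
        · have := hB2 c h
          simp only [List.count_cons_self] at this
          push_cast at this ⊢
          omega
        · intro y hyc
          by_cases hyx : y = x
          · subst hyx
            have hnot : y ∉ t := fun hm => absurd (hc y hm) (not_le.mpr hxc)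
            rw [List.count_eq_zero.mpr hnot]
            omega
          · have := hB2 y hyx
            have hcnt : (c :: t).count y = t.count y := by
              simp [(show ¬c = y from fun e => hyc e.symm)]
            rw [hcnt] at this
            exact this

theorem pvFmLe {α : Type} (l : List α) (f : α → Int) (init B : Int)
    (h0 : init ≤ B) (h : ∀ x ∈ l, f x ≤ B) :
    l.foldl (fun a y => max a (f y)) init ≤ B := by
  induction l generalizing init with
  | nil => exact h0
  | cons a l ih =>
    simp only [List.foldl_cons]
    exact ih (max init (f a)) (max_le h0 (h a (List.mem_cons_self ..)))
      (fun x hx => h x (List.mem_cons_of_mem _ hx))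

theorem pvA_eval (rl : List (Option (List String))) :
    compute_top1_agreement rl =
      if pvTops rl = [] then 0
      else (PySem.List.max? (PySem.Dict.counter (pvTops rl)).values (fun v => v)).getD 0 := by
  unfold compute_top1_agreement
  have h := pvTopsA_eq rl []
  simp only [List.nil_append] at h
  by_cases hv : (pvValid rl).length = 0
  · have hnil : pvValid rl = [] := List.length_eq_zero_iff.mp hv
    rw [hnil] at h
    simp only [List.foldl_nil] at h
    simp [hv, ← h]
  · simp only [if_neg hv, h]

theorem pvMain (tops : List String) (hne : tops ≠ []) :
    (PySem.List.max? (PySem.Dict.counter tops).values (fun v => v)).getD 0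
    = (((PySem.List.sorted tops (fun x => x) false).zip
          (PySem.List.sorted tops (fun x => x) false).tail).foldl
        (fun rb pc =>
          if pc.2 = pc.1 then
            (rb.1 + 1, if rb.1 + 1 > rb.2 then rb.1 + 1 else rb.2)
          else (1, rb.2)) ((1 : Int), (1 : Int))).2 := by
  have hsne : PySem.List.sorted tops (fun x => x) false ≠ [] := by
    simp only [ne_eq, PySem.List.sorted_eq_nil_iff]
    exact hne
  obtain ⟨x, t, hsc⟩ : ∃ x t, PySem.List.sorted tops (fun x => x) false = x :: t := by
    cases hs : PySem.List.sorted tops (fun x => x) false with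
    | nil => exact absurd hs hsne
    | cons a b => exact ⟨a, b, rfl⟩
  -- sortedness of x :: t
  have hperm : (x :: t).Perm tops := hsc ▸ PySem.List.sorted_perm tops (fun x => x) false
  have hpw : (x :: t).Pairwise (· ≤ ·) := by
    have := PySem.List.sorted_pairwise tops (fun x => x)
    rw [hsc] at this
    exact this
  obtain ⟨hxle, hpt⟩ := List.pairwise_cons.mp hpw
  -- RHS = pvMaxRun x 1 t
  have hrhs : (((PySem.List.sorted tops (fun x => x) false).zip
          (PySem.List.sorted tops (fun x => x) false).tail).foldl
        (fun rb pc =>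
          if pc.2 = pc.1 then
            (rb.1 + 1, if rb.1 + 1 > rb.2 then rb.1 + 1 else rb.2)
          else (1, rb.2)) ((1 : Int), (1 : Int))).2 = pvMaxRun x 1 t := by
    rw [hsc]
    simp only [List.tail_cons]
    rw [pvZipfold_eq t x 1 1, pvAux_eq t x 1 1 (le_refl 1) (le_refl 1)]
    have := pvRun_le_maxRun t x 1
    omega
  rw [hrhs]
  -- counts transfer between tops and x :: t
  have hcnt : ∀ y, (tops.count y : Int) = ((x :: t).count y : Int) := by
    intro y; rw [hperm.count_eq]
  -- LHS via Counter characterisation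
  obtain ⟨k, ks, hof⟩ : ∃ k ks, PySem.Set.ofList tops = k :: ks := by
    obtain ⟨y, hy⟩ := List.exists_mem_of_ne_nil tops hne
    cases hs : PySem.Set.ofList tops with
    | nil =>
      exfalso
      have : y ∈ PySem.Set.ofList tops := (PySem.Set.mem_ofList tops y).mpr hy
      rw [hs] at this
      exact absurd this (List.not_mem_nil)
    | cons a b => exact ⟨a, b, rfl⟩
  have hvals : (PySem.Dict.counter tops).values
      = (PySem.Set.ofList tops).map (fun k => (tops.count k : Int)) := by
    show ((PySem.Dict.counter tops).items).map Prod.snd = _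
    rw [PySem.Dict.items_counter]
    simp [List.map_map, Function.comp]
  have hmemS : ∀ y, y ∈ PySem.Set.ofList tops ↔ y ∈ tops := fun y => PySem.Set.mem_ofList tops y
  -- the left fold value
  have hlhs : (PySem.List.max? (PySem.Dict.counter tops).values (fun v => v)).getD 0
      = (ks.map (fun k => (tops.count k : Int))).foldl max ((tops.count k : Int)) := by
    rw [hvals, hof]
    simp only [List.map_cons]
    rw [PySem.List.max?_id_cons]
    rfl
  rw [hlhs, List.foldl_map]
  -- every count (w.r.t. tops) of a member of tops is ≤ pvMaxRun x 1 t
  have hub : ∀ y ∈ tops, (tops.count y : Int) ≤ pvMaxRun x 1 t := by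
    intro y hy
    rw [hcnt y]
    by_cases hyx : y = x
    · subst hyx
      have := pvL1 t y 1 hxle hpt
      simp only [List.count_cons_self]
      push_cast
      omega
    · have hyt : y ∈ t := by
        rcases List.mem_cons.mp (hperm.mem_iff.mpr hy) with e | hm
        · exact absurd e hyx
        · exact hm
      have := pvL2 t x 1 (le_refl 1) hxle hpt y hyt
      have hc : (x :: t).count y = t.count y := by
        simp [(show ¬x = y from fun e => hyx e.symm)]
      rw [hc]
      exact this
  -- the fold dominates every count of a member of tops
  have hfold := PySem.List.le_foldl_max_int ks (fun k => (tops.count k : Int)) ((tops.count k : Int))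
  have hlb : ∀ y ∈ tops, (tops.count y : Int) ≤ ks.foldl (fun a y => max a ((tops.count y : Int))) ((tops.count k : Int)) := by
    intro y hy
    have hyS : y ∈ PySem.Set.ofList tops := (hmemS y).mpr hy
    rw [hof] at hyS
    rcases List.mem_cons.mp hyS with e | hm
    · subst e; exact hfold.1
    · exact hfold.2 y hm
  apply le_antisymm
  · -- fold ≤ pvMaxRun
    apply pvFmLe
    · have hk : k ∈ tops := (hmemS k).mp (by rw [hof]; exact List.mem_cons_self ..)
      exact hub k hk
    · intro y hy
      have hyt : y ∈ tops := (hmemS y).mp (by rw [hof]; exact List.mem_cons_of_mem _ hy)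
      exact hub y hyt
  · -- pvMaxRun ≤ fold
    have hxtops : x ∈ tops := hperm.mem_iff.mp (List.mem_cons_self ..)
    have h0fold : (0 : Int) ≤ ks.foldl (fun a y => max a ((tops.count y : Int))) ((tops.count k : Int)) := by
      have := hfold.1
      have : (0 : Int) ≤ ((tops.count k : Int)) := by positivity
      omega
    apply pvU t x 1 _ (le_refl 1) hxle hpt
    · have := hlb x hxtops
      have hcx : (tops.count x : Int) = ((x :: t).count x : Int) := hcnt x
      simp only [List.count_cons_self] at hcx
      push_cast at hcx ⊢
      omega
    · intro y hyx
      by_cases hy : y ∈ tops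
      · have := hlb y hy
        have hcy : (tops.count y : Int) = ((x :: t).count y : Int) := hcnt y
        have hc : (x :: t).count y = t.count y := by
          simp [(show ¬x = y from fun e => hyx e.symm)]
        rw [hc] at hcy
        omega
      · have hnot : y ∉ t := fun hm =>
          hy (hperm.mem_iff.mp (List.mem_cons_of_mem _ hm))
        rw [List.count_eq_zero.mpr hnot]
        exact h0fold

-- ===== VERDICT (by name: the statement is the Claim_ definition above) =====
theorem compute_top1_agreement_spec : Claim_equal_compute_top1_agreement := by
  intro rl _
  unfold Spec_compute_top1_agreement compute_top1_agreement_alt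
  rw [pvA_eval]
  by_cases h : pvTops rl = []
  · simp [h]
  · simp only [if_neg h]
    exact pvMain (pvTops rl) h
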